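-- pv_equiv track=rewrite | github.com/AhmedShafique313/Business-automations | agents/intelligence/orchestrator.py | _get_action_priority
-- ===== SOURCE A (Python) =====
-- def _get_action_priority(action: str) -> int:
--     """Get priority score for an action."""
--     priority_keywords = {
--         'conversion': 3,
--         'engagement': 2,
--         'content': 2,
--         'timing': 1
--     }
--
--     for keyword, priority in priority_keywords.items():
--         if keyword in action.lower():
--             return priority
--     return 0
-- ===== SOURCE B (Python) =====
-- def _get_action_priority(action: str) -> int:
--     """Get priority score for an action."""
--     priority_keywords = {
--         'conversion': 3,
--         'engagement': 2,
--         'content': 2,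
--         'timing': 1
--     }
--     low = action.lower()
--     return max((p for k, p in priority_keywords.items() if k in low), default=0)
-- ===== Notes on version B (the rewrite author's own statement) =====
-- stated objective: alternative
-- what changed: Replaces the ordered early-return keyword loop with an aggregate: take the maximum priority over all keywords occurring in the lowercased action, default 0 (equivalent because the dict's values are in descending order).
import Mathlib
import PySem

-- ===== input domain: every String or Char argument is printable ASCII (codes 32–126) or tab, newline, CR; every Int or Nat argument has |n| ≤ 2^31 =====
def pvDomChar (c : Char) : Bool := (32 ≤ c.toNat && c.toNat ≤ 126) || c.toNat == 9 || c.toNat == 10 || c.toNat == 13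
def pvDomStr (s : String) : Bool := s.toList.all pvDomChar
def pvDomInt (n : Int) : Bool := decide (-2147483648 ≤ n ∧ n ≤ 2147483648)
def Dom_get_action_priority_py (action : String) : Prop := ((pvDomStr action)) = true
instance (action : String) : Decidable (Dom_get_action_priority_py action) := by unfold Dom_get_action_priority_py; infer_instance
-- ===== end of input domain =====

-- B replaces the ordered early-return keyword loop with a max over all matching keywords (default 0); equivalent since the priorities are in descending order. Objective: alternative decomposition.


-- ===== PORT A =====
-- A: walk the keyword/priority pairs in order, return the first whose keyword is a substring of action.lower(); else 0.
def pvKeywords : List (String × Int) :=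
  [("conversion", 3), ("engagement", 2), ("content", 2), ("timing", 1)]

def getPrioLoop (low : String) : List (String × Int) → Int
  | [] => 0
  | (k, p) :: rest => if PySem.Str.isIn k low then p else getPrioLoop low rest

def get_action_priority_py (action : String) : Int :=
  getPrioLoop (PySem.Str.lower action) pvKeywords

-- ===== PORT B =====
-- B: maximum priority over all matching keywords, default 0.
def get_action_priority_py_alt (action : String) : Int :=
  let low := PySem.Str.lower action
  match PySem.List.max? ((pvKeywords.filter (fun kp => PySem.Str.isIn kp.1 low)).map Prod.snd) (fun y => y) with
  | none => 0
  | some v => v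

-- ===== PRECONDITION & SPEC =====
def Spec_get_action_priority_py (action : String) (out : Int) : Prop := out = get_action_priority_py_alt action
instance (action : String) (out : Int) : Decidable (Spec_get_action_priority_py action out) := by unfold Spec_get_action_priority_py; infer_instance

-- ===== CLAIM (what is proved, stated in full; the proofs are below) =====
def Claim_equal_get_action_priority_py : Prop := ∀ (action : String), Dom_get_action_priority_py action → Spec_get_action_priority_py action (get_action_priority_py action)

-- ===== LEMMAS AND PROOFS =====

-- ===== VERDICT (by name: the statement is the Claim_ definition above) =====
theorem get_action_priority_py_spec : Claim_equal_get_action_priority_py := by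
  intro action _
  unfold Spec_get_action_priority_py get_action_priority_py get_action_priority_py_alt
  set low := PySem.Str.lower action with hlow
  by_cases h1 : PySem.Str.isIn "conversion" low <;>
  by_cases h2 : PySem.Str.isIn "engagement" low <;>
  by_cases h3 : PySem.Str.isIn "content" low <;>
  by_cases h4 : PySem.Str.isIn "timing" low <;>
    simp_all [pvKeywords, getPrioLoop, PySem.List.max?]
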